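-- pv_equiv track=rewrite | github.com/2D-C0DES/Python | Computer Networks PCA1/Problem4.py | ones_complement_addition
-- ===== SOURCE A (Python) =====
-- def ones_complement_addition(a, b):
--     """
--     Perform 1's complement addition of two binary strings.
--     """
--     max_len = max(len(a), len(b))
--
--     # Make both binary strings equal length
--     a = a.zfill(max_len)
--     b = b.zfill(max_len)
--
--     result = ''
--     carry = 0
--
--     # Add bit by bit from LSB to MSB
--     for i in range(max_len - 1, -1, -1):
--         total = carry
--         total += 1 if a[i] == '1' else 0
--         total += 1 if b[i] == '1' else 0
--
--         bit = total % 2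
--         carry = total // 2
--
--         result = str(bit) + result
--
--     # If carry remains, wrap around
--     if carry:
--         result = ones_complement_addition(result, '1'.zfill(max_len))
--
--     return result
-- ===== SOURCE B (Python) =====
-- def ones_complement_addition(a, b):
--     n = max(len(a), len(b))
--     va = 0
--     for c in a:
--         va = 2 * va + (1 if c == '1' else 0)
--     vb = 0
--     for c in b:
--         vb = 2 * vb + (1 if c == '1' else 0)
--     s = va + vb
--     if s >> n:
--         s = s - (1 << n) + 1
--     return ''.join('1' if (s >> (n - 1 - i)) & 1 else '0' for i in range(n))
-- ===== Notes on version B (the rewrite author's own statement) =====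
-- stated objective: faster
-- what changed: Replaces A's LSB-to-MSB digit-by-digit carry loop (which rebuilds the result string by prepending each bit) and its recursive end-around-carry call with plain integer arithmetic: compute the two bit values, add, apply the end-around carry once via a shift test, and render n bits.
import Mathlib
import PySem

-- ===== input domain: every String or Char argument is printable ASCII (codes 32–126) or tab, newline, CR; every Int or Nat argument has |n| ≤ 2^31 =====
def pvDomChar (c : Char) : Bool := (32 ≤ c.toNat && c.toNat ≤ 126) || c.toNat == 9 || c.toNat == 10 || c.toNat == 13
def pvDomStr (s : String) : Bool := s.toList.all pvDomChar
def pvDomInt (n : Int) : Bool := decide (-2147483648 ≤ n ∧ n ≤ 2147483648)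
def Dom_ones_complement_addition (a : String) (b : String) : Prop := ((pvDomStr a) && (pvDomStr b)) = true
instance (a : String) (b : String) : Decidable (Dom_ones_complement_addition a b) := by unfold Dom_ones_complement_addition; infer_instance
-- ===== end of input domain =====

-- B replaces A's LSB-to-MSB carry loop and recursive end-around-carry call by plain
-- integer arithmetic (add the two bit values, wrap the carry once, render n bits).

-- ===== PORT A =====
-- pvBitVal/pvRender and the lemmas below, up to pvAddLoop_eq, exist to justify the
-- termination of A's recursive end-around-carry call (measure: sum of bit values).
def pvBitVal (l : List Char) : Nat :=
  l.foldl (fun v c => 2 * v + (if c = '1' then 1 else 0)) 0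

def pvRender (x : Nat) (n : Nat) : List Char :=
  (List.range n).map (fun i => if (x >>> (n - 1 - i)) &&& 1 = 1 then '1' else '0')

-- the for-loop of A: bits are processed from the LSB (list end) upwards, str(bit)
-- is prepended, the carry propagates towards the head; returns (result, carry)
def pvAddLoop : List Char → List Char → List Char × Nat
  | x :: xs, y :: ys =>
    let p := pvAddLoop xs ys
    let tot := p.2 + (if x = '1' then 1 else 0) + (if y = '1' then 1 else 0)
    ((if tot % 2 = 1 then '1' else '0') :: p.1, tot / 2)
  | _, _ => ([], 0)

theorem pvBitVal_foldl (l : List Char) (v : Nat) :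
    l.foldl (fun v c => 2 * v + (if c = '1' then 1 else 0)) v = v * 2 ^ l.length + pvBitVal l := by
  induction l generalizing v with
  | nil => simp [pvBitVal]
  | cons c l ih =>
    rw [List.foldl_cons, ih,
      show pvBitVal (c :: l) = l.foldl (fun v c => 2 * v + (if c = '1' then 1 else 0))
        (2 * 0 + if c = '1' then 1 else 0) from rfl, ih]
    simp only [List.length_cons]
    ring

theorem pvBitVal_cons (c : Char) (l : List Char) :
    pvBitVal (c :: l) = (if c = '1' then 1 else 0) * 2 ^ l.length + pvBitVal l := by
  rw [show pvBitVal (c :: l) = l.foldl (fun v c => 2 * v + (if c = '1' then 1 else 0))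
        (2 * 0 + if c = '1' then 1 else 0) from rfl, pvBitVal_foldl]
  ring

theorem pvBitVal_lt (l : List Char) : pvBitVal l < 2 ^ l.length := by
  induction l with
  | nil => simp [pvBitVal]
  | cons c l ih =>
    rw [pvBitVal_cons]
    simp only [List.length_cons, pow_succ]
    split <;> omega

theorem pvBitVal_replicate (k : Nat) : pvBitVal (List.replicate k '0') = 0 := by
  induction k with
  | zero => simp [pvBitVal]
  | succ k ih => rw [List.replicate_succ, pvBitVal_cons]; simp [ih]

theorem pvBitVal_append (s t : List Char) :
    pvBitVal (s ++ t) = pvBitVal s * 2 ^ t.length + pvBitVal t := by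
  rw [show pvBitVal (s ++ t)
        = t.foldl (fun v c => 2 * v + (if c = '1' then 1 else 0))
            (s.foldl (fun v c => 2 * v + (if c = '1' then 1 else 0)) 0) from by
      simp [pvBitVal, List.foldl_append], pvBitVal_foldl]
  rfl

theorem pvBitVal_zfill (s : List Char) (w : Nat) :
    pvBitVal (PySem.Chars.zfill s (w : Int)) = pvBitVal s := by
  unfold PySem.Chars.zfill
  split
  · rfl
  · match s with
    | [] => exact pvBitVal_replicate w
    | c :: rest =>
      simp only
      split
      · rw [pvBitVal_cons, pvBitVal_cons, pvBitVal_append, pvBitVal_replicate]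
        rcases ‹c = '+' ∨ c = '-'› with h | h <;> simp [h]
      · rw [pvBitVal_append, pvBitVal_replicate]
        simp

theorem pvZfill_length (s : List Char) (w : Nat) :
    (PySem.Chars.zfill s (w : Int)).length = max s.length w := by
  rw [PySem.Chars.length_zfill]
  simp

theorem pvRender_length (x n : Nat) : (pvRender x n).length = n := by
  simp [pvRender]

theorem pvRender_succ (x m : Nat) :
    pvRender x (m + 1) = (if (x >>> m) &&& 1 = 1 then '1' else '0') :: pvRender x m := by
  unfold pvRender
  rw [List.range_succ_eq_map, List.map_cons, List.map_map]
  refine congrArg₂ List.cons ?_ ?_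
  · rw [show m + 1 - 1 - 0 = m from by omega]
  · exact List.map_congr_left (fun i _ => by
      simp only [Function.comp_apply, Nat.succ_eq_add_one]
      rw [show m + 1 - 1 - (i + 1) = m - 1 - i from by omega])

theorem pvBit_mod (x k j : Nat) (h : j < k) :
    ((x % 2 ^ k) >>> j) &&& 1 = (x >>> j) &&& 1 := by
  rw [Nat.and_one_is_mod, Nat.and_one_is_mod, Nat.shiftRight_eq_div_pow, Nat.shiftRight_eq_div_pow]
  have hk : (2:Nat) ^ k = 2 ^ j * 2 ^ (k - j) := by rw [← pow_add]; congr 1; omega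
  rw [hk, Nat.mod_mul_right_div_self]
  exact Nat.mod_mod_of_dvd _ (dvd_pow_self 2 (by omega : k - j ≠ 0))

theorem pvRender_mod (x m : Nat) : pvRender (x % 2 ^ m) m = pvRender x m := by
  unfold pvRender
  exact List.map_congr_left (fun i hi => by
    rw [pvBit_mod x m (m - 1 - i) (by simp at hi; omega)])

theorem pvBitVal_render (x n : Nat) : pvBitVal (pvRender x n) = x % 2 ^ n := by
  induction n with
  | zero => simp [pvRender, pvBitVal, Nat.mod_one]
  | succ m ih =>
    rw [pvRender_succ, pvBitVal_cons, pvRender_length, ih]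
    have hmod : x % 2 ^ (m + 1) = ((x >>> m) &&& 1) * 2 ^ m + x % 2 ^ m := by
      rw [Nat.and_one_is_mod, Nat.shiftRight_eq_div_pow, pow_succ, Nat.mod_mul]
      ring
    by_cases hb : (x >>> m) &&& 1 = 1
    · rw [hb] at hmod
      simp only [hb]
      simp
      omega
    · have hb0 : (x >>> m) &&& 1 = 0 := by
        rw [Nat.and_one_is_mod] at hb ⊢; omega
      rw [hb0] at hmod
      simp only [hb0] at ⊢
      simp
      omega

theorem pvAddLoop_eq (a b : List Char) (h : a.length = b.length) :
    pvAddLoop a b = (pvRender (pvBitVal a + pvBitVal b) a.length,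
                     (pvBitVal a + pvBitVal b) / 2 ^ a.length) := by
  induction a generalizing b with
  | nil =>
    cases b with
    | nil => simp [pvAddLoop, pvRender, pvBitVal]
    | cons y ys => simp at h
  | cons x xs ih =>
    cases b with
    | nil => simp at h
    | cons y ys =>
      have hlen : xs.length = ys.length := by simpa using h
      have hpos : 0 < 2 ^ xs.length := Nat.two_pow_pos _
      have hIH := ih ys hlen
      have hS : pvBitVal (x :: xs) + pvBitVal (y :: ys)
          = (pvBitVal xs + pvBitVal ys)
            + ((if x = '1' then 1 else 0) + (if y = '1' then 1 else 0)) * 2 ^ xs.length := by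
        rw [pvBitVal_cons, pvBitVal_cons, ← hlen]
        ring
      have hdiv : (pvBitVal (x :: xs) + pvBitVal (y :: ys)) / 2 ^ xs.length
          = (pvBitVal xs + pvBitVal ys) / 2 ^ xs.length
            + ((if x = '1' then 1 else 0) + (if y = '1' then 1 else 0)) := by
        rw [hS, Nat.add_mul_div_right _ _ hpos]
      have htot : (pvBitVal xs + pvBitVal ys) / 2 ^ xs.length
            + (if x = '1' then 1 else 0) + (if y = '1' then 1 else 0)
          = (pvBitVal (x :: xs) + pvBitVal (y :: ys)) / 2 ^ xs.length := by
        rw [hdiv]; ring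
      simp only [pvAddLoop, hIH]
      refine Prod.ext ?_ ?_
      · show (if _ then '1' else '0') :: pvRender (pvBitVal xs + pvBitVal ys) xs.length = _
        simp only [List.length_cons]
        rw [pvRender_succ]
        congr 1
        · rw [Nat.and_one_is_mod, Nat.shiftRight_eq_div_pow, ← htot]
        · rw [← pvRender_mod (pvBitVal xs + pvBitVal ys) xs.length,
            ← pvRender_mod (pvBitVal (x :: xs) + pvBitVal (y :: ys)) xs.length]
          congr 1
          rw [hS, Nat.add_mul_mod_self_right]
      · show ((pvBitVal xs + pvBitVal ys) / 2 ^ xs.length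
            + (if x = '1' then 1 else 0) + (if y = '1' then 1 else 0)) / 2 = _
        rw [htot]
        simp only [List.length_cons]
        rw [Nat.div_div_eq_div_mul, ← pow_succ]

theorem pvMeasure_lt (A B n : Nat) (hA : A < 2 ^ n) (hB : B < 2 ^ n)
    (hc : (A + B) / 2 ^ n ≠ 0) : (A + B) % 2 ^ n + 1 < A + B := by
  have hpos : 0 < 2 ^ n := Nat.two_pow_pos _
  have hdm := Nat.div_add_mod (A + B) (2 ^ n)
  have hml := Nat.mod_lt (A + B) hpos
  rcases Nat.lt_or_ge (2 ^ n) 2 with h2 | h2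
  · have h1 : 2 ^ n = 1 := by omega
    rw [h1] at hA hB hc
    simp [Nat.div_one] at hc
    omega
  · have h1 : A + B = 2 ^ n * ((A + B) / 2 ^ n) + (A + B) % 2 ^ n := (Nat.div_add_mod _ _).symm
    have hq1 : 1 ≤ (A + B) / 2 ^ n := Nat.one_le_iff_ne_zero.mpr hc
    revert hml h1 hq1
    generalize (A + B) / 2 ^ n = q
    generalize (A + B) % 2 ^ n = r
    intro hml h1 hq1
    have hq2 : 2 ^ n * 1 ≤ 2 ^ n * q := Nat.mul_le_mul_left _ hq1
    omega

def ones_complement_addition (a : String) (b : String) : String :=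
  let n : Nat := max a.toList.length b.toList.length
  let a' := PySem.Chars.zfill a.toList (n : Int)
  let b' := PySem.Chars.zfill b.toList (n : Int)
  let p := pvAddLoop a' b'
  if h : p.2 ≠ 0 then
    ones_complement_addition (String.ofList p.1) (String.ofList (PySem.Chars.zfill ['1'] (n : Int)))
  else
    String.ofList p.1
termination_by pvBitVal a.toList + pvBitVal b.toList
decreasing_by
  simp only [String.toList_ofList]
  simp only [p, a', b', n] at h
  have hla : a.toList.length ≤ max a.toList.length b.toList.length := le_max_left _ _
  have hlb : b.toList.length ≤ max a.toList.length b.toList.length := le_max_right _ _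
  have ha' : (PySem.Chars.zfill a.toList ((max a.toList.length b.toList.length : Nat) : Int)).length
      = max a.toList.length b.toList.length := by rw [pvZfill_length]; omega
  have hb' : (PySem.Chars.zfill b.toList ((max a.toList.length b.toList.length : Nat) : Int)).length
      = max a.toList.length b.toList.length := by rw [pvZfill_length]; omega
  rw [pvAddLoop_eq _ _ (ha'.trans hb'.symm), pvBitVal_zfill, pvBitVal_zfill, ha'] at h ⊢
  simp only [pvBitVal_render]
  have hz1 : pvBitVal (PySem.Chars.zfill ['1']
      ((max a.toList.length b.toList.length : Nat) : Int)) = 1 := by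
    rw [pvBitVal_zfill]
    simp [pvBitVal]
  rw [hz1]
  have hA : pvBitVal a.toList < 2 ^ max a.toList.length b.toList.length :=
    lt_of_lt_of_le (pvBitVal_lt _) (Nat.pow_le_pow_right (by omega) hla)
  have hB : pvBitVal b.toList < 2 ^ max a.toList.length b.toList.length :=
    lt_of_lt_of_le (pvBitVal_lt _) (Nat.pow_le_pow_right (by omega) hlb)
  have hc : (pvBitVal a.toList + pvBitVal b.toList) / 2 ^ max a.toList.length b.toList.length ≠ 0 := by
    simpa using h
  have := pvMeasure_lt _ _ _ hA hB hc
  omega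

-- ===== PORT B =====
def ones_complement_addition_alt (a : String) (b : String) : String :=
  let n : Nat := max a.toList.length b.toList.length
  let va := a.toList.foldl (fun v c => 2 * v + (if c = '1' then 1 else 0)) 0
  let vb := b.toList.foldl (fun v c => 2 * v + (if c = '1' then 1 else 0)) 0
  let s0 := va + vb
  let s := if s0 >>> n ≠ 0 then s0 - (1 <<< n) + 1 else s0
  String.ofList ((List.range n).map (fun i => if (s >>> (n - 1 - i)) &&& 1 = 1 then '1' else '0'))

-- ===== PRECONDITION & SPEC =====
def Spec_ones_complement_addition (a : String) (b : String) (out : String) : Prop := out = ones_complement_addition_alt a b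
instance (a : String) (b : String) (out : String) : Decidable (Spec_ones_complement_addition a b out) := by unfold Spec_ones_complement_addition; infer_instance

-- ===== CLAIM (what is proved, stated in full; the proofs are below) =====
def Claim_equal_ones_complement_addition : Prop := ∀ (a : String) (b : String), Dom_ones_complement_addition a b → Spec_ones_complement_addition a b (ones_complement_addition a b)

-- ===== LEMMAS AND PROOFS =====

theorem pvZfill_of_le (s : List Char) (w : Nat) (h : w ≤ s.length) :
    PySem.Chars.zfill s (w : Int) = s := by
  unfold PySem.Chars.zfill
  rw [if_pos (by exact_mod_cast h)]

theorem pvWrap (A B n : Nat) (hA : A < 2 ^ n) (hB : B < 2 ^ n)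
    (hc : (A + B) / 2 ^ n ≠ 0) :
    (A + B) % 2 ^ n + 1 = A + B - (1 <<< n) + 1
      ∧ ((A + B) % 2 ^ n + 1) / 2 ^ n = 0 ∧ 1 ≤ n := by
  rw [Nat.one_shiftLeft]
  have hpos : 0 < 2 ^ n := Nat.two_pow_pos _
  have hn1 : 1 ≤ n := by
    by_contra hn
    have hn0 : n = 0 := by omega
    rw [hn0] at hA hB hc
    simp at hA hB
    rw [hA, hB] at hc
    simp at hc
  have hdm := Nat.div_add_mod (A + B) (2 ^ n)
  have hml := Nat.mod_lt (A + B) hpos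
  have hq1 : 1 ≤ (A + B) / 2 ^ n := Nat.one_le_iff_ne_zero.mpr hc
  have hq2 : (A + B) / 2 ^ n < 2 := Nat.div_lt_of_lt_mul (by omega)
  have hq : (A + B) / 2 ^ n = 1 := by omega
  rw [hq] at hdm
  refine ⟨by omega, ?_, hn1⟩
  exact Nat.div_eq_of_lt (by omega)

theorem ones_complement_addition_main (a b : String) :
    ones_complement_addition a b = ones_complement_addition_alt a b := by
  have hla := le_max_left a.toList.length b.toList.length
  have hlb := le_max_right a.toList.length b.toList.length
  have hA : pvBitVal a.toList < 2 ^ max a.toList.length b.toList.length :=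
    lt_of_lt_of_le (pvBitVal_lt _) (Nat.pow_le_pow_right (by omega) hla)
  have hB : pvBitVal b.toList < 2 ^ max a.toList.length b.toList.length :=
    lt_of_lt_of_le (pvBitVal_lt _) (Nat.pow_le_pow_right (by omega) hlb)
  have ha' : (PySem.Chars.zfill a.toList ((max a.toList.length b.toList.length : Nat) : Int)).length
      = max a.toList.length b.toList.length := by rw [pvZfill_length]; omega
  have hb' : (PySem.Chars.zfill b.toList ((max a.toList.length b.toList.length : Nat) : Int)).length
      = max a.toList.length b.toList.length := by rw [pvZfill_length]; omega
  have hloop := pvAddLoop_eq _ _ (ha'.trans hb'.symm)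
  rw [pvBitVal_zfill, pvBitVal_zfill, ha'] at hloop
  have hBdef : ones_complement_addition_alt a b
      = String.ofList (pvRender
          (if (pvBitVal a.toList + pvBitVal b.toList) >>> (max a.toList.length b.toList.length) ≠ 0
           then pvBitVal a.toList + pvBitVal b.toList
                  - (1 <<< max a.toList.length b.toList.length) + 1
           else pvBitVal a.toList + pvBitVal b.toList)
          (max a.toList.length b.toList.length)) := rfl
  have hshift : (pvBitVal a.toList + pvBitVal b.toList) >>> (max a.toList.length b.toList.length)
      = (pvBitVal a.toList + pvBitVal b.toList) / 2 ^ max a.toList.length b.toList.length :=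
    Nat.shiftRight_eq_div_pow _ _
  rw [ones_complement_addition]
  simp only [hloop]
  by_cases hc : (pvBitVal a.toList + pvBitVal b.toList) / 2 ^ max a.toList.length b.toList.length = 0
  · rw [dif_neg (by simpa using hc), hBdef]
    rw [if_neg (by rw [hshift]; simpa using hc)]
  · rw [dif_pos (by simpa using hc)]
    obtain ⟨hw1, hw2, hn1⟩ := pvWrap _ _ _ hA hB hc
    have hz1len : (PySem.Chars.zfill ['1'] ((max a.toList.length b.toList.length : Nat) : Int)).length
        = max a.toList.length b.toList.length := by rw [pvZfill_length]; simp only [List.length_singleton]; omega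
    have hz1val : pvBitVal (PySem.Chars.zfill ['1'] ((max a.toList.length b.toList.length : Nat) : Int)) = 1 := by
      rw [pvBitVal_zfill]; simp [pvBitVal]
    rw [ones_complement_addition]
    simp only [String.toList_ofList, pvRender_length, hz1len, max_self]
    rw [pvZfill_of_le _ _ (by rw [pvRender_length]),
        pvZfill_of_le _ _ (by rw [hz1len])]
    have hlen2 : (pvRender (pvBitVal a.toList + pvBitVal b.toList) (max a.toList.length b.toList.length)).length
        = (PySem.Chars.zfill ['1'] ((max a.toList.length b.toList.length : Nat) : Int)).length := by
      rw [pvRender_length, hz1len]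
    rw [pvAddLoop_eq _ _ hlen2]
    simp only [pvBitVal_render, hz1val, pvRender_length]
    rw [dif_neg (by simpa using hw2), hBdef,
        if_pos (by rw [hshift]; exact hc), ← hw1]

-- ===== VERDICT (by name: the statement is the Claim_ definition above) =====
theorem ones_complement_addition_spec : Claim_equal_ones_complement_addition := by
  intro a b _
  exact ones_complement_addition_main a b
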